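-- pv_equiv track=rewrite | github.com/shanewilkins/roadmap | roadmap/adapters/cli/presentation/milestone_presenter.py | _extract_description_and_goals
-- ===== SOURCE A (Python) =====
-- def _extract_description_and_goals(content: str) -> tuple[str, str]:
--     """Parse content to extract description and goals sections.
--
--     Args:
--         content: Raw content string with markdown sections
--
--     Returns:
--         Tuple of (description, goals) strings
--     """
--     content_lines = content.split("\n")
--     description_lines = []
--     goals_lines = []
--     in_goals = False
--
--     for line in content_lines:
--         if "## Goals" in line or "## goals" in line.lower():
--             in_goals = True
--             continue
--         elif line.startswith("## ") and in_goals: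
--             in_goals = False
--
--         if in_goals:
--             goals_lines.append(line)
--         elif not line.startswith("#"):
--             description_lines.append(line)
--
--     return "\n".join(description_lines).strip(), "\n".join(goals_lines).strip()
-- ===== SOURCE B (Python) =====
-- def _extract_description_and_goals(content: str) -> tuple[str, str]:
--     """Region-based single scan: jump over each goals region with an inner index
--     scan instead of carrying an in_goals flag on every line."""
--
--     def is_goals(line):
--         return "## goals" in line.lower()
--
--     def is_term(line):
--         return line.startswith("## ") and not is_goals(line)
--
--     lines = content.split("\n")
--     n = len(lines)
--     description_lines = []
--     goals_lines = []
--     i = 0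
--     while i < n:
--         line = lines[i]
--         if is_goals(line):
--             j = i + 1
--             while j < n and not is_term(lines[j]):
--                 j += 1
--             goals_lines.extend(l for l in lines[i + 1:j] if not is_goals(l))
--             i = j + 1  # the terminating '## ' line (if any) is dropped
--         else:
--             if not line.startswith("#"):
--                 description_lines.append(line)
--             i += 1
--     return "\n".join(description_lines).strip(), "\n".join(goals_lines).strip()
-- ===== Notes on version B (the rewrite author's own statement) =====
-- stated objective: alternative
-- what changed: A carries an in_goals flag across a single per-line loop; B scans by regions: on each goals header an inner scan jumps to the end of the goals region at once, and lines outside regions feed the description directly, with no cross-line state flag.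
import Mathlib
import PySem

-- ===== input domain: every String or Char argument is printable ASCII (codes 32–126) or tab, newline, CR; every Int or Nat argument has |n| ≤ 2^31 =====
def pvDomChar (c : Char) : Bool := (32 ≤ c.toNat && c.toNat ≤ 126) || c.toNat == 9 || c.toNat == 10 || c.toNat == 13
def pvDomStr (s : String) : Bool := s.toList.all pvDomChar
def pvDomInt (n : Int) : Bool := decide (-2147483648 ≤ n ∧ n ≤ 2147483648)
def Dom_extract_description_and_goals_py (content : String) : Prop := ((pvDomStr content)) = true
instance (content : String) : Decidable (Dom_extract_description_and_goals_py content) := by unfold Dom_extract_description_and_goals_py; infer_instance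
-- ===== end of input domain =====

-- B replaces A's per-line in_goals flag loop by a region scan (jump over each goals
-- region with an inner scan); objective: alternative decomposition, same cost.

-- ===== PORT A =====
-- A's flag loop: state (description_lines, goals_lines, in_goals), one line at a time.
def pvLoopA : List (List Char) → List (List Char) → List (List Char) → Bool →
    List (List Char) × List (List Char)
  | [], d, g, _ => (d, g)
  | l :: rest, d, g, ing =>
    if PySem.Chars.isIn "## Goals".toList l
        || PySem.Chars.isIn "## goals".toList (PySem.Chars.lower l) then
      pvLoopA rest d g true
    else
      let ing1 := if PySem.Chars.startswith l "## ".toList && ing then false else ing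
      if ing1 then pvLoopA rest d (g ++ [l]) ing1
      else if !PySem.Chars.startswith l "#".toList then pvLoopA rest (d ++ [l]) g ing1
      else pvLoopA rest d g ing1

def extract_description_and_goals_py (content : String) : String × String :=
  (String.ofList (PySem.Chars.strip (PySem.Chars.join "\n".toList
      (pvLoopA (PySem.Chars.splitOn content.toList "\n".toList) [] [] false).1)),
   String.ofList (PySem.Chars.strip (PySem.Chars.join "\n".toList
      (pvLoopA (PySem.Chars.splitOn content.toList "\n".toList) [] [] false).2)))

-- ===== PORT B =====
def pvIsGoals (l : List Char) : Bool :=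
  PySem.Chars.isIn "## goals".toList (PySem.Chars.lower l)

def pvIsTerm (l : List Char) : Bool :=
  PySem.Chars.startswith l "## ".toList && !pvIsGoals l

-- B's region scan: on a goals header, the inner scan (takeWhile/dropWhile = the
-- inner 'while j < n' loop) consumes the whole goals region at once.
def pvParseB : List (List Char) → List (List Char) × List (List Char)
  | [] => ([], [])
  | l :: rest =>
    if pvIsGoals l then
      let region := (rest.takeWhile (fun x => !pvIsTerm x)).filter (fun x => !pvIsGoals x)
      match _hdrop : rest.dropWhile (fun x => !pvIsTerm x) with
      | [] => ([], region)
      | _ :: rs =>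
        let p := pvParseB rs
        (p.1, region ++ p.2)
    else
      let p := pvParseB rest
      if PySem.Chars.startswith l "#".toList then p else (l :: p.1, p.2)
termination_by l => l.length
decreasing_by
  · have h1 : (rest.dropWhile (fun x => !pvIsTerm x)).length ≤ rest.length :=
      List.length_dropWhile_le _ _
    rw [_hdrop] at h1
    simp at h1 ⊢
    omega
  · simp

def extract_description_and_goals_py_alt (content : String) : String × String :=
  (String.ofList (PySem.Chars.strip (PySem.Chars.join "\n".toList
      (pvParseB (PySem.Chars.splitOn content.toList "\n".toList)).1)),
   String.ofList (PySem.Chars.strip (PySem.Chars.join "\n".toList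
      (pvParseB (PySem.Chars.splitOn content.toList "\n".toList)).2)))

-- ===== PRECONDITION & SPEC =====
def Spec_extract_description_and_goals_py (content : String) (out : String × String) : Prop := out = extract_description_and_goals_py_alt content
instance (content : String) (out : String × String) : Decidable (Spec_extract_description_and_goals_py content out) := by unfold Spec_extract_description_and_goals_py; infer_instance

-- ===== CLAIM (what is proved, stated in full; the proofs are below) =====
def Claim_equal_extract_description_and_goals_py : Prop := ∀ (content : String), Dom_extract_description_and_goals_py content → Spec_extract_description_and_goals_py content (extract_description_and_goals_py content)

-- ===== LEMMAS AND PROOFS =====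

-- A's double goals-header test collapses to B's single lowered test.
lemma pvGoalsA_eq (l : List Char) :
    (PySem.Chars.isIn "## Goals".toList l
      || PySem.Chars.isIn "## goals".toList (PySem.Chars.lower l)) = pvIsGoals l := by
  unfold pvIsGoals
  cases h : PySem.Chars.isIn "## Goals".toList l with
  | false => simp
  | true =>
    have hinf : "## Goals".toList <:+: l := (PySem.Chars.isIn_iff_infix _ _).1 h
    have h2 : "## goals".toList <:+: PySem.Chars.lower l := by
      have := hinf.map PySem.Chars.lowerChar
      simpa [PySem.Chars.lower] using this
    simp only [Bool.true_or]
    exact ((PySem.Chars.isIn_iff_infix _ _).2 h2).symm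

-- the in_goals=true phase of A's loop, characterised by B's region scan
lemma pvLoopA_true (lines : List (List Char)) : ∀ d g,
    pvLoopA lines d g true =
      (match lines.dropWhile (fun x => !pvIsTerm x) with
       | [] => (d, g ++ (lines.takeWhile (fun x => !pvIsTerm x)).filter (fun x => !pvIsGoals x))
       | _ :: rs => pvLoopA rs d
            (g ++ (lines.takeWhile (fun x => !pvIsTerm x)).filter (fun x => !pvIsGoals x)) false) := by
  induction lines with
  | nil => intro d g; simp [pvLoopA]
  | cons l rest ih =>
    intro d g
    by_cases hg : pvIsGoals l = true
    · have hterm : pvIsTerm l = false := by simp [pvIsTerm, hg]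
      rw [pvLoopA, pvGoalsA_eq]
      simp only [hg, if_true, hterm, List.dropWhile_cons, List.takeWhile_cons,
        Bool.not_false, if_true, List.filter_cons]
      simp [ih d g]
    · by_cases ht : pvIsTerm l = true
      · have h2 : PySem.Chars.startswith l "## ".toList = true := by
          simp [pvIsTerm] at ht; exact ht.1
        have h1 : PySem.Chars.startswith l "#".toList = true := by
          have := (PySem.Chars.startswith_iff _ _).1 h2
          exact (PySem.Chars.startswith_iff _ _).2 (List.IsPrefix.trans (by decide) this)
        have h2' : PySem.Chars.startswith l ['#', '#', ' '] = true := h2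
        have h1' : PySem.Chars.startswith l ['#'] = true := h1
        rw [pvLoopA, pvGoalsA_eq]
        simp [hg, h2', h1', ht]
      · have h2 : PySem.Chars.startswith l "## ".toList = false := by
          simp [pvIsTerm, hg] at ht; simpa using ht
        rw [pvLoopA, pvGoalsA_eq]
        simp only [hg, if_false, Bool.false_eq_true, h2, Bool.false_and, if_true]
        simp only [List.dropWhile_cons, List.takeWhile_cons, ht, Bool.not_false, if_true,
          List.filter_cons, hg]
        rw [ih d (g ++ [l])]
        simp

-- the in_goals=false phase of A's loop equals B's parse, up to the accumulators
lemma pvLoopA_false : ∀ n (lines : List (List Char)), lines.length ≤ n → ∀ d g,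
    pvLoopA lines d g false = (d ++ (pvParseB lines).1, g ++ (pvParseB lines).2) := by
  intro n
  induction n with
  | zero => intro lines h d g; simp at h; simp [h, pvLoopA, pvParseB]
  | succ n ih =>
    intro lines h d g
    match lines with
    | [] => simp [pvLoopA, pvParseB]
    | l :: rest =>
      simp only [List.length_cons, Nat.succ_le_succ_iff] at h
      by_cases hg : pvIsGoals l = true
      · rw [pvLoopA, pvGoalsA_eq]
        simp only [hg, if_true]
        rw [pvLoopA_true]
        rw [pvParseB]
        simp only [hg, if_true]
        cases hdrop : rest.dropWhile (fun x => !pvIsTerm x) with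
        | nil => simp
        | cons t rs =>
          have hlen : rs.length ≤ n := by
            have := List.length_dropWhile_le (fun x => !pvIsTerm x) rest
            rw [hdrop] at this; simp at this; omega
          dsimp only
          rw [ih rs hlen]
          simp
      · rw [pvLoopA, pvGoalsA_eq, pvParseB]
        simp only [hg, if_false, Bool.false_eq_true, Bool.and_false, if_false]
        by_cases hs : PySem.Chars.startswith l "#".toList = true
        · simp only [hs, Bool.not_true, if_false, if_true, Bool.false_eq_true]
          exact ih rest h d g
        · simp only [Bool.not_eq_true] at hs
          simp only [hs, Bool.not_false, if_true, Bool.false_eq_true, if_false]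
          rw [ih rest h (d ++ [l]) g]
          simp

-- ===== VERDICT (by name: the statement is the Claim_ definition above) =====
theorem extract_description_and_goals_py_spec : Claim_equal_extract_description_and_goals_py := by
  intro content _
  unfold Spec_extract_description_and_goals_py extract_description_and_goals_py
    extract_description_and_goals_py_alt
  rw [pvLoopA_false (PySem.Chars.splitOn content.toList "\n".toList).length _ le_rfl]
  simp
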